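-- pv_equiv track=rewrite | github.com/Chanwanit-Nuchyoo/Programming-Laboratory-Management-System | backend/plms-reboot-ci-3/supervisor_data/c_files/exercise_1301092.py | odd_check
-- ===== SOURCE A (Python) =====
-- def odd_check(num1):
--     num = num1.split()
--     odd_num = 0
--     sum = 0
--
--     for n in num:
--         sum += int(n)
--         if int(n)%2 != 0:
--             continue
--         else:
--             odd_num += 1
--     if odd_num == 0:
--         return (True,sum)
--     else:
--         return (False,sum)
-- ===== SOURCE B (Python) =====
-- def odd_check(num1):
--     def go(tokens):
--         if not tokens:
--             return (True, 0)
--         if len(tokens) == 1: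
--             v = int(tokens[0])
--             return (v % 2 != 0, v)
--         mid = len(tokens) // 2
--         lok, ls = go(tokens[:mid])
--         rok, rs = go(tokens[mid:])
--         return (lok and rok, ls + rs)
--     return go(num1.split())
-- ===== Notes on version B (the rewrite author's own statement) =====
-- stated objective: alternative
-- what changed: Replaces A's single imperative left-to-right fold with a mutable even-counter tested after the loop by a divide-and-conquer recursion that splits the token list in half and merges the (all_odd, sum) pairs of the two halves.
import Mathlib
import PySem

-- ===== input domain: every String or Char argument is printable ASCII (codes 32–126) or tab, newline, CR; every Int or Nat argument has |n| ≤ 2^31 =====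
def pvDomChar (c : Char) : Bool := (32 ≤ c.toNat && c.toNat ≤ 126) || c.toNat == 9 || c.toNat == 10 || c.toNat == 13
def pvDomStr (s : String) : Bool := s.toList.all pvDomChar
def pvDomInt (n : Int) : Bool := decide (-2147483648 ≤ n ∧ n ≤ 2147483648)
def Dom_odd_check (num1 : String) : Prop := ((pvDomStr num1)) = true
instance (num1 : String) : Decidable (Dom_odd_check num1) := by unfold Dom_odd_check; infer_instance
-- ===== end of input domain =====

-- B replaces A's single fold with a mutable even-counter tested after the loop by a
-- divide-and-conquer recursion merging the (all_odd, sum) pairs of the two halves; same cost.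

-- ===== PORT A =====
-- one loop step of A: add int(n) to sum; if int(n) is even, bump odd_num
def oddCheckStepA (st : Int × Int) (n : String) : Int × Int :=
  let v := (PySem.Int.ofStr? n).getD 0   -- none (ValueError) excluded by Pre_
  (if PySem.Int.mod v 2 ≠ 0 then st.1 else st.1 + 1, st.2 + v)

def odd_check (num1 : String) : Bool × Int :=
  let num := PySem.Str.split₀ num1
  let st := num.foldl oddCheckStepA (0, 0)
  if st.1 = 0 then (true, st.2) else (false, st.2)

-- ===== PORT B =====
-- B's inner recursion go(tokens): empty → (True, 0); singleton → (parity, value);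
-- else split at mid = len // 2 and merge the two halves' pairs
def oddCheckGo (ts : List String) : Bool × Int :=
  if _h0 : ts = [] then (true, 0)
  else if _h1 : ts.length = 1 then
    let v := (PySem.Int.ofStr? (PySem.List.pyGetD ts 0 "")).getD 0   -- ValueError excluded by Pre_
    (decide (PySem.Int.mod v 2 ≠ 0), v)
  else
    let mid := PySem.Int.floordiv (ts.length : Int) 2
    let l := oddCheckGo (PySem.List.slice ts none (some mid))
    let r := oddCheckGo (PySem.List.slice ts (some mid) none)
    (l.1 && r.1, l.2 + r.2)
termination_by ts.length
decreasing_by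
  · rw [show PySem.Int.floordiv (ts.length : Int) 2 = ((ts.length / 2 : Nat) : Int) from
        PySem.Int.floordiv_natCast _ _, PySem.List.slice_to_natCast]
    have : ts.length ≠ 0 := fun h => _h0 (List.eq_nil_of_length_eq_zero h)
    simp only [List.length_take]
    omega
  · rw [show PySem.Int.floordiv (ts.length : Int) 2 = ((ts.length / 2 : Nat) : Int) from
        PySem.Int.floordiv_natCast _ _, PySem.List.slice_from_natCast]
    have : ts.length ≠ 0 := fun h => _h0 (List.eq_nil_of_length_eq_zero h)
    simp only [List.length_drop]
    omega

def odd_check_alt (num1 : String) : Bool × Int :=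
  oddCheckGo (PySem.Str.split₀ num1)

-- ===== PRECONDITION & SPEC =====
-- Pre_ excludes exactly the inputs where int(token) raises ValueError (a non-integer token)
def Pre_odd_check (num1 : String) : Prop :=
  ∀ w ∈ PySem.Str.split₀ num1, (PySem.Int.ofStr? w).isSome = true
instance (num1 : String) : Decidable (Pre_odd_check num1) := by unfold Pre_odd_check; infer_instance
def pvWitness_odd_check : String := "1 2 3"

def Spec_odd_check (num1 : String) (out : Bool × Int) : Prop := out = odd_check_alt num1
instance (num1 : String) (out : Bool × Int) : Decidable (Spec_odd_check num1 out) := by unfold Spec_odd_check; infer_instance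

-- ===== CLAIM (what is proved, stated in full; the proofs are below) =====
def Claim_equal_odd_check : Prop := ∀ (num1 : String), Dom_odd_check num1 → Pre_odd_check num1 → Spec_odd_check num1 (odd_check num1)

-- ===== LEMMAS AND PROOFS =====

-- the int value of a token, shorthand for the lemmas
def oddVal (t : String) : Int := (PySem.Int.ofStr? t).getD 0

-- B's divide-and-conquer computes "all tokens odd" and the plain sum of the values
theorem oddCheckGo_eq (ts : List String) :
    oddCheckGo ts
      = (ts.all (fun t => decide (PySem.Int.mod (oddVal t) 2 ≠ 0)), (ts.map oddVal).sum) := by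
  induction ts using oddCheckGo.induct with
  | case1 => simp [oddCheckGo]
  | case2 ts h0 h1 =>
      obtain ⟨t, ht⟩ := List.length_eq_one_iff.mp h1
      subst ht
      simp [oddCheckGo, oddVal, PySem.List.pyGetD_zero_cons]
  | case3 ts h0 h1 mid ihl ihr =>
      rw [oddCheckGo]
      simp only [dif_neg h0, dif_neg h1]
      rw [ihl, ihr]
      have hsplit : PySem.List.slice ts none (some (PySem.Int.floordiv (ts.length : Int) 2))
            = ts.take (ts.length / 2) ∧
          PySem.List.slice ts (some (PySem.Int.floordiv (ts.length : Int) 2)) none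
            = ts.drop (ts.length / 2) := by
        rw [show PySem.Int.floordiv (ts.length : Int) 2 = ((ts.length / 2 : Nat) : Int) from
            PySem.Int.floordiv_natCast _ _]
        exact ⟨PySem.List.slice_to_natCast _ _, PySem.List.slice_from_natCast _ _⟩
      rw [hsplit.1, hsplit.2]
      refine Prod.ext ?_ ?_
      · simp [← List.all_append]
      · simp [← List.sum_append]

-- A's fold, second component: the running sum plus the values' sum
theorem oddA_fold_snd (l : List String) (c s : Int) :
    (l.foldl oddCheckStepA (c, s)).2 = s + (l.map oddVal).sum := by
  induction l generalizing c s with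
  | nil => simp
  | cons x xs ih =>
      simp only [List.foldl_cons, oddCheckStepA, List.map_cons, List.sum_cons]
      split_ifs <;> · rw [ih]; simp [oddVal]; ring
-- A's fold, first component: the even-counter is the start plus the number of even values
theorem oddA_fold_fst (l : List String) (c s : Int) :
    (l.foldl oddCheckStepA (c, s)).1
      = c + (l.countP (fun t => decide (PySem.Int.mod (oddVal t) 2 = 0)) : Int) := by
  induction l generalizing c s with
  | nil => simp
  | cons x xs ih =>
      simp only [List.foldl_cons, List.countP_cons, oddCheckStepA]
      by_cases h : PySem.Int.mod (oddVal x) 2 ≠ 0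
      · rw [if_pos (by simpa [oddVal] using h), ih, decide_eq_false h]
        simp
      · rw [if_neg (by simpa [oddVal] using h), ih, decide_eq_true (not_not.mp h)]
        simp only [if_true]
        omega

theorem odd_check_spec : Claim_equal_odd_check := by
  intro num1 _ _
  unfold Spec_odd_check odd_check odd_check_alt
  rw [oddCheckGo_eq]
  simp only [oddA_fold_snd, oddA_fold_fst, zero_add]
  set l := PySem.Str.split₀ num1
  by_cases h : (l.countP (fun t => decide (PySem.Int.mod (oddVal t) 2 = 0)) : Int) = 0
  · have h0 : l.countP (fun t => decide (PySem.Int.mod (oddVal t) 2 = 0)) = 0 := by exact_mod_cast h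
    rw [List.countP_eq_zero] at h0
    have hall : l.all (fun t => decide (PySem.Int.mod (oddVal t) 2 ≠ 0)) = true := by
      rw [List.all_eq_true]; intro t ht
      exact decide_eq_true (fun hc => h0 t ht (decide_eq_true hc))
    rw [if_pos h, hall]
  · have h0 : ¬ l.countP (fun t => decide (PySem.Int.mod (oddVal t) 2 = 0)) = 0 := by
      intro hc; exact h (by exact_mod_cast hc)
    rw [List.countP_eq_zero] at h0
    push Not at h0
    obtain ⟨t, ht, htp⟩ := h0
    have hz : PySem.Int.mod (oddVal t) 2 = 0 := of_decide_eq_true htp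
    have hall : l.all (fun t => decide (PySem.Int.mod (oddVal t) 2 ≠ 0)) = false := by
      rw [List.all_eq_false]
      exact ⟨t, ht, by rw [decide_eq_false (not_not.mpr hz)]; exact Bool.false_ne_true⟩
    rw [if_neg h, hall]
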